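-- pv_equiv track=rewrite | github.com/winter-olaf/algorithm-study | Programmers/최준원/[2][2020카카오공채]괄호 변환.py | solution
-- ===== SOURCE A (Python) =====
-- def uv(w):
--     u = ''
--     v = ''
--     stack = 0
--     for idx,val in enumerate(w):
--         # 균형잡힌 괄호 문자열 u,v로 반환하기 위해
--         # stack이 0인 경우 = '('와')'의 수가 동일하면 break
--         if val == '(':
--             stack += 1
--         else:
--             stack -= 1
--         if stack == 0:
--             break
--     u += w[:idx+1]
--     v += w[idx+1:]
--     return u,v
--
-- def True_or_False(p):
--     stack = 0
--     for i in p: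
--         if i == '(':
--             stack += 1
--         else:
--             stack -= 1
--         if stack < 0:
--             return False
--     return True
--
-- def solution(p):
--     ans = ''
--     # 1,2
--     if p == '':
--         return ''
--     else:
--         u,v = uv(p)
--     # 3
--     if True_or_False(u) == True:
--         # 3-1
--         ans += u
--         # 문자열 v에 대한 재귀함수
--         ans += solution(v)
--     # 4
--     else:
--         # 4-1
--         ans += '('
--         # 4-2
--         ans += solution(v)
--         # 4-3
--         ans += ')'
--         # 4-4,4-5
--         for i in u[1:-1]:
--             if i == '(':
--                 ans += ')'
--             else:
--                 ans += '('
--     return ans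
-- ===== SOURCE B (Python) =====
-- def solution(p):
--     n = len(p)
--     pre = [0] * (n + 1)
--     for t in range(n):
--         pre[t + 1] = pre[t] + (1 if p[t] == '(' else -1)
--     out = []
--     work = [(False, 0)]  # stack of tasks: (False, i) = transform suffix p[i:], (True, s) = emit literal s
--     while work:
--         lit, x = work.pop()
--         if lit:
--             out.append(x)
--             continue
--         i = x
--         if i == n:
--             continue
--         k = i + 1
--         while k < n and pre[k] != pre[i]:
--             k += 1
--         if min(pre[i + 1:k + 1]) >= pre[i]:
--             out.append(p[i:k])
--             work.append((False, k))
--         else: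
--             out.append('(')
--             tail = ')' + ''.join(')' if p[t] == '(' else '(' for t in range(i + 1, k - 1))
--             work.append((True, tail))
--             work.append((False, k))
--     return ''.join(out)
-- ===== Notes on version B (the rewrite author's own statement) =====
-- stated objective: alternative
-- what changed: A is a recursive splitter: each level slices u/v copies of the string, re-scans u with a second pass for validity, and builds the answer by recursive string concatenation; B is iterative: it precomputes one prefix-balance table over the original string, then runs a single while-loop over an explicit task stack of suffix start indices and literal pieces, reading the split point off the table, deciding validity by a min over a table slice, and joining the collected pieces once.
import Mathlib
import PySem

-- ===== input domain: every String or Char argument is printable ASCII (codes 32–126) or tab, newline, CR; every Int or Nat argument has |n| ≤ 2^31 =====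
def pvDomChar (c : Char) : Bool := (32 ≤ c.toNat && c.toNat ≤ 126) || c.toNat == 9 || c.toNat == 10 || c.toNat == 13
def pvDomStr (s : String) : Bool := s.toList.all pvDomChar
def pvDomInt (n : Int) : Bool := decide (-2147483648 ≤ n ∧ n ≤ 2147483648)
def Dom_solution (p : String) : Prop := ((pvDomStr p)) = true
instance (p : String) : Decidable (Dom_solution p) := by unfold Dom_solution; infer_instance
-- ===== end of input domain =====

-- B replaces A's recursion (re-slicing u/v copies and re-scanning u for validity at every
-- level) by an iterative worklist: one precomputed prefix-balance table over the original
-- string, a while-loop over an explicit task stack of suffix indices and literal pieces,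
-- the split point read off the table and validity decided by a min over a table slice
-- (alternative decomposition; return values proved equal on all inputs).

-- ===== PORT A =====

-- uv's for-loop: returns the idx at which the loop stopped (stack hit 0, or last index)
def uvIdx : List Char → Int → Nat → Nat
  | [], _, idx => idx
  | c :: rest, stack, idx =>
      let stack' := if c = '(' then stack + 1 else stack - 1
      if stack' = 0 then idx
      else match rest with
        | [] => idx
        | _ :: _ => uvIdx rest stack' (idx + 1)

-- True_or_False
def tofA : List Char → Int → Bool
  | [], _ => true
  | c :: rest, stack =>
      let stack' := if c = '(' then stack + 1 else stack - 1
      if stack' < 0 then false else tofA rest stack'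

-- the 4-4/4-5 flipping for-loop
def flipA : List Char → List Char
  | [] => []
  | c :: rest => (if c = '(' then ')' else '(') :: flipA rest

-- termination fact for solA (cited in its decreasing_by)
theorem slice_from_len_lt (p : List Char) (n : Nat) (h : p ≠ []) :
    (PySem.List.slice p (some ((n + 1 : Nat) : Int)) none).length < p.length := by
  rw [PySem.List.slice_from_natCast]
  have : p.length ≠ 0 := fun h0 => h (List.eq_nil_of_length_eq_zero h0)
  simp only [List.length_drop]
  omega

def solA (p : List Char) : List Char :=
  if _hp : p = [] then []
  else
    let idx := uvIdx p 0 0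
    let u := PySem.List.slice p none (some ((idx + 1 : Nat) : Int))        -- w[:idx+1]
    let v := PySem.List.slice p (some ((idx + 1 : Nat) : Int)) none        -- w[idx+1:]
    if tofA u 0 then u ++ solA v
    else '(' :: (solA v ++ ')' :: flipA (PySem.List.slice u (some 1) (some (-1))))  -- u[1:-1]
termination_by p.length
decreasing_by
  all_goals exact slice_from_len_lt p (uvIdx p 0 0) _hp

def solution (p : String) : String := String.ofList (solA p.toList)

-- ===== PORT B =====

-- the prefix-balance building for-loop: pre[t] = balance of p[:t], as a scan
def preList : List Char → Int → List Int
  | [], b => [b]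
  | c :: r, b => b :: preList r (b + (if c = '(' then 1 else -1))

-- the inner while-loop: first k with k < n and pre[k] == target not failing, i.e. advance
-- k while k < n and pre[k] != target
def findK (pre : List Int) (n : Nat) (target : Int) (k : Nat) : Nat :=
  if h : k < n then
    if pre.getD k 0 ≠ target then findK pre n target (k + 1) else k
  else k
termination_by n - k
decreasing_by exact Nat.sub_succ_lt_self n k h

-- a work item: (False, i) = transform the suffix p[i:], (True, s) = emit the literal s
inductive WItem
  | seg : Nat → WItem
  | lit : List Char → WItem

-- termination measure for the worklist loop, and the facts its decreasing_by cites
def wMeasure (n : Nat) : WItem → Nat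
  | .seg i => 2 * (n - i) + 2
  | .lit _ => 1

theorem findK_ge (pre : List Int) (n : Nat) (t : Int) (k : Nat) :
    k ≤ findK pre n t k := by
  fun_induction findK
  all_goals omega

theorem findK_le (pre : List Int) (n : Nat) (t : Int) (k : Nat) (h : k ≤ n) :
    findK pre n t k ≤ n := by
  fun_induction findK
  all_goals omega

theorem length_preList (ps : List Char) : ∀ (b : Int), (preList ps b).length = ps.length + 1 := by
  induction ps with
  | nil => intro b; rfl
  | cons c r ih => intro b; simp [preList, ih]

-- cited in loopB's decreasing_by: a some-result of the min over the pre-slice forces i < |ps|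
theorem min?_slice_pre_lt (ps : List Char) (i k : Nat) (m : Int)
    (hm : PySem.List.min? (PySem.List.slice (preList ps 0) (some ((i + 1 : Nat) : Int))
            (some ((k + 1 : Nat) : Int))) (fun x => x) = some m) :
    i < ps.length := by
  have hne : PySem.List.slice (preList ps 0) (some ((i + 1 : Nat) : Int))
      (some ((k + 1 : Nat) : Int)) ≠ [] := by
    intro h0
    rw [h0] at hm
    simp [PySem.List.min?] at hm
  rw [PySem.List.slice_natCast] at hne
  have hd : (preList ps 0).drop (i + 1) ≠ [] := by
    intro h0; rw [h0] at hne; simp at hne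
  rw [ne_eq, List.drop_eq_nil_iff, length_preList ps 0] at hd
  omega

-- the while work: loop, recursing on the task stack; Source B's loop-local names n and pre
-- (fixed before the loop) are written out as ps.length and preList ps 0, k as its findK value
def loopB (ps : List Char) : List WItem → List Char
  | [] => []
  | .lit s :: rest => s ++ loopB ps rest
  | .seg i :: rest =>
    if i = ps.length then loopB ps rest
    else
      match hm : PySem.List.min? (PySem.List.slice (preList ps 0) (some ((i + 1 : Nat) : Int))
          (some ((findK (preList ps 0) ps.length ((preList ps 0).getD i 0) (i + 1) + 1 : Nat) : Int)))
          (fun x => x) with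
      | none => []   -- Python's min would raise only on an empty slice; unreachable (i < n ≤ |pre|-1)
      | some m =>
        if (preList ps 0).getD i 0 ≤ m then
          PySem.List.slice ps (some ((i : Nat) : Int))
              (some ((findK (preList ps 0) ps.length ((preList ps 0).getD i 0) (i + 1) : Nat) : Int)) ++
            loopB ps (.seg (findK (preList ps 0) ps.length ((preList ps 0).getD i 0) (i + 1)) :: rest)
        else
          '(' :: loopB ps (.seg (findK (preList ps 0) ps.length ((preList ps 0).getD i 0) (i + 1)) ::
            .lit (')' :: (List.range' (i + 1)
                (findK (preList ps 0) ps.length ((preList ps 0).getD i 0) (i + 1) - 1 - (i + 1))).map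
              (fun t => if ps.getD t ' ' = '(' then ')' else '(')) :: rest)
termination_by w => (w.map (wMeasure ps.length)).sum
decreasing_by
  · simp [wMeasure]
  · simp [wMeasure]
  · have hi := min?_slice_pre_lt ps i (findK (preList ps 0) ps.length ((preList ps 0).getD i 0) (i + 1)) m hm
    have h1 := findK_ge (preList ps 0) ps.length ((preList ps 0).getD i 0) (i + 1)
    have h2 := findK_le (preList ps 0) ps.length ((preList ps 0).getD i 0) (i + 1) (by omega)
    simp only [List.map_cons, List.sum_cons, wMeasure]
    omega
  · have hi := min?_slice_pre_lt ps i (findK (preList ps 0) ps.length ((preList ps 0).getD i 0) (i + 1)) m hm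
    have h1 := findK_ge (preList ps 0) ps.length ((preList ps 0).getD i 0) (i + 1)
    have h2 := findK_le (preList ps 0) ps.length ((preList ps 0).getD i 0) (i + 1) (by omega)
    simp only [List.map_cons, List.sum_cons, wMeasure]
    omega

def solution_alt (p : String) : String := String.ofList (loopB p.toList [WItem.seg 0])

-- ===== PRECONDITION & SPEC =====
def Spec_solution (p : String) (out : String) : Prop := out = solution_alt p
instance (p : String) (out : String) : Decidable (Spec_solution p out) := by unfold Spec_solution; infer_instance

-- ===== CLAIM (what is proved, stated in full; the proofs are below) =====
def Claim_equal_solution : Prop := ∀ (p : String), Dom_solution p → Spec_solution p (solution p)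

-- ===== LEMMAS AND PROOFS =====


-- reference scan: (number of chars consumed before stopping, whether balance went negative)
def refScan : List Char → Int → Bool → Nat × Bool
  | [], _, neg => (0, neg)
  | c :: rest, bal, neg =>
      let bal' := if c = '(' then bal + 1 else bal - 1
      let neg' := if bal' < 0 then true else neg
      if bal' = 0 then (1, neg')
      else
        let r := refScan rest bal' neg'
        (r.1 + 1, r.2)

-- whether the running balance ever goes negative
def negScan : List Char → Int → Bool
  | [], _ => false
  | c :: rest, bal =>
      let bal' := if c = '(' then bal + 1 else bal - 1
      if bal' < 0 then true else negScan rest bal'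

theorem refScan_fst_pos (seg : List Char) (bal : Int) (neg : Bool) (h : seg ≠ []) :
    1 ≤ (refScan seg bal neg).1 := by
  cases seg with
  | nil => exact absurd rfl h
  | cons c rest =>
      simp only [refScan]
      split <;> split <;> exact Nat.succ_le_succ (Nat.zero_le _)

theorem refScan_fst_le (seg : List Char) : ∀ (bal : Int) (neg : Bool),
    (refScan seg bal neg).1 ≤ seg.length := by
  induction seg with
  | nil => simp [refScan]
  | cons c rest ih =>
      intro bal neg
      simp only [refScan, List.length_cons]
      split <;> split <;> first
        | exact Nat.add_le_add_right (ih _ _) 1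
        | exact Nat.succ_le_succ (Nat.zero_le _)

theorem uvIdx_eq_refScan : ∀ (seg : List Char) (bal : Int) (idx : Nat) (neg : Bool), seg ≠ [] →
    uvIdx seg bal idx + 1 = idx + (refScan seg bal neg).1 := by
  intro seg
  induction seg with
  | nil => intro _ _ _ hn; exact absurd rfl hn
  | cons c rest ih =>
      intro bal idx neg _
      simp only [uvIdx, refScan]
      by_cases hst : (if c = '(' then bal + 1 else bal - 1) = 0
      · simp [hst]
      · cases rest with
        | nil => simp [hst, refScan]
        | cons d tail =>
            simp only [if_neg hst]
            have := ih (if c = '(' then bal + 1 else bal - 1) (idx + 1)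
              (if (if c = '(' then bal + 1 else bal - 1) < 0 then true else neg) (by simp)
            omega

theorem tofA_eq_negScan : ∀ (xs : List Char) (bal : Int), tofA xs bal = !negScan xs bal := by
  intro xs
  induction xs with
  | nil => simp [tofA, negScan]
  | cons c rest ih =>
      intro bal
      simp only [tofA, negScan]
      split <;> split <;> simp [ih]

theorem slice_one_neg_one (xs : List Char) :
    PySem.List.slice xs (some 1) (some (-1)) = (xs.drop 1).dropLast := by
  rcases xs with _ | ⟨a, ys⟩
  · rfl
  · simp [PySem.List.slice, PySem.List.clampIdx, List.dropLast_eq_take]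
    split_ifs <;> omega

-- running balance after consuming t characters (clamped past the end)
def balAt : List Char → Int → Nat → Int
  | _, b, 0 => b
  | [], b, _ + 1 => b
  | c :: r, b, t + 1 => balAt r (b + (if c = '(' then 1 else -1)) t

theorem balAt_nil (b : Int) (t : Nat) : balAt [] b t = b := by cases t <;> rfl

theorem balAt_add : ∀ (xs : List Char) (b : Int) (i t : Nat),
    balAt xs b (i + t) = balAt (xs.drop i) (balAt xs b i) t := by
  intro xs
  induction xs with
  | nil => intro b i t; simp [balAt_nil]
  | cons c r ih =>
      intro b i t
      cases i with
      | zero => simp [balAt]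
      | succ i' =>
          rw [show i' + 1 + t = (i' + t) + 1 by omega]
          simp only [balAt, List.drop_succ_cons]
          exact ih _ i' t

theorem balAt_shift : ∀ (xs : List Char) (a : Int) (t : Nat),
    balAt xs a t = a + balAt xs 0 t := by
  intro xs
  induction xs with
  | nil => intro a t; simp [balAt_nil]
  | cons c r ih =>
      intro a t
      cases t with
      | zero => simp [balAt]
      | succ t' =>
          simp only [balAt]
          rw [ih (a + _) t', ih (0 + _) t']
          ring

theorem balAt_succ (xs : List Char) (b : Int) (i : Nat) (h : i < xs.length) :
    balAt xs b (i + 1) = balAt xs b i + (if xs.getD i ' ' = '(' then 1 else -1) := by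
  rw [balAt_add xs b i 1, List.drop_eq_getElem_cons h, List.getD_eq_getElem xs ' ' h]
  simp [balAt]

theorem balAt_take : ∀ (xs : List Char) (b : Int) (d t : Nat), t ≤ d →
    balAt (xs.take d) b t = balAt xs b t := by
  intro xs
  induction xs with
  | nil => intro b d t _; simp
  | cons c r ih =>
      intro b d t ht
      cases d with
      | zero =>
          cases t with
          | zero => rfl
          | succ t' => omega
      | succ d' =>
          cases t with
          | zero => rfl
          | succ t' =>
              simp only [List.take_succ_cons, balAt]
              exact ih _ d' t' (by omega)

theorem getD_preList : ∀ (xs : List Char) (b : Int) (k : Nat), k ≤ xs.length →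
    (preList xs b).getD k 0 = balAt xs b k := by
  intro xs
  induction xs with
  | nil =>
      intro b k hk
      have hk0 : k = 0 := by simpa using hk
      subst hk0
      rfl
  | cons c r ih =>
      intro b k hk
      cases k with
      | zero => rfl
      | succ k' =>
          simp only [preList, List.getD_cons_succ, balAt]
          exact ih _ k' (by simpa using hk)

theorem negScan_iff : ∀ (xs : List Char) (bal : Int),
    negScan xs bal = true ↔ ∃ t, t < xs.length ∧ balAt xs bal (t + 1) < 0 := by
  intro xs
  induction xs with
  | nil => simp [negScan]
  | cons c r ih =>
      intro bal
      have hsame : (if c = '(' then bal + 1 else bal - 1) = bal + (if c = '(' then 1 else -1) := by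
        split <;> ring
      simp only [negScan, balAt, hsame]
      by_cases hlt : bal + (if c = '(' then (1 : Int) else -1) < 0
      · simp only [if_pos hlt, true_iff]
        exact ⟨0, by simp, by simpa [balAt] using hlt⟩
      · simp only [if_neg hlt, ih]
        constructor
        · rintro ⟨t, ht, hb⟩
          exact ⟨t + 1, by simpa using Nat.succ_lt_succ ht, hb⟩
        · rintro ⟨t, ht, hb⟩
          cases t with
          | zero => exact absurd (by simpa [balAt] using hb) hlt
          | succ t' => exact ⟨t', by simpa using Nat.lt_of_succ_lt_succ ht, hb⟩

-- findK over the prefix table = the split offset computed by the reference scan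
theorem findK_ref : ∀ (seg ps : List Char) (i0 t : Nat) (bal : Int) (neg : Bool),
    seg = ps.drop (i0 + t) → i0 + t < ps.length →
    bal = balAt ps 0 (i0 + t) - balAt ps 0 i0 →
    findK (preList ps 0) ps.length (balAt ps 0 i0) (i0 + t + 1)
      = i0 + t + (refScan seg bal neg).1 := by
  intro seg
  induction seg with
  | nil =>
      intro ps i0 t bal neg hseg hlt _
      exact absurd (List.drop_eq_nil_iff.mp hseg.symm) (by omega)
  | cons c rest ih =>
      intro ps i0 t bal neg hseg hlt hbal
      have hcons := List.drop_eq_getElem_cons hlt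
      rw [hcons] at hseg
      obtain ⟨hc, hrest⟩ : c = ps[i0 + t] ∧ rest = ps.drop (i0 + t + 1) :=
        List.cons_eq_cons.mp hseg
      have hstep : balAt ps 0 (i0 + t + 1)
          = balAt ps 0 (i0 + t) + (if c = '(' then 1 else -1) := by
        rw [balAt_succ ps 0 (i0 + t) hlt, List.getD_eq_getElem ps ' ' hlt, hc]
      have hb' : balAt ps 0 (i0 + t + 1) - balAt ps 0 i0
          = (if c = '(' then bal + 1 else bal - 1) := by
        rw [hstep, hbal]; split <;> ring
      rw [findK]
      by_cases hkn : i0 + t + 1 < ps.length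
      · rw [dif_pos hkn]
        have hget : (preList ps 0).getD (i0 + t + 1) 0 = balAt ps 0 (i0 + t + 1) :=
          getD_preList ps 0 (i0 + t + 1) (by omega)
        by_cases hz : (if c = '(' then bal + 1 else bal - 1) = 0
        · have : ¬ (preList ps 0).getD (i0 + t + 1) 0 ≠ balAt ps 0 i0 := by
            rw [hget]; simp only [← Nat.add_assoc] at *; omega
          rw [if_neg this]
          simp only [refScan, if_pos hz]
        · have : (preList ps 0).getD (i0 + t + 1) 0 ≠ balAt ps 0 i0 := by
            rw [hget]; simp only [← Nat.add_assoc] at *; omega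
          rw [if_pos this]
          have hrec := ih ps i0 (t + 1) (if c = '(' then bal + 1 else bal - 1)
            (if (if c = '(' then bal + 1 else bal - 1) < 0 then true else neg)
            (by rw [← Nat.add_assoc]; exact hrest) (by omega) (by simp only [← Nat.add_assoc]; omega)
          simp only [refScan, if_neg hz]
          simp only [← Nat.add_assoc] at hrec
          omega
      · rw [dif_neg hkn]
        have : rest = [] := by
          rw [hrest]
          exact List.drop_eq_nil_iff.mpr (by omega)
        subst this
        simp only [refScan]
        split <;> simp [refScan]

-- the min over the pre-slice decides validity: min test passes iff the scan never went negative
theorem mintest_iff (ps : List Char) (i d : Nat) (m : Int)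
    (hi : i < ps.length) (hd1 : 1 ≤ d) (hdle : d ≤ ps.length - i)
    (hm : PySem.List.min? (((preList ps 0).drop (i + 1)).take d) (fun x => x) = some m) :
    ((preList ps 0).getD i 0 ≤ m ↔ negScan ((ps.drop i).take d) 0 = false) := by
  have hlen : (((preList ps 0).drop (i + 1)).take d).length = d := by
    simp [length_preList]; omega
  have hidx : ∀ j, ∀ hj : j < (((preList ps 0).drop (i + 1)).take d).length,
      (((preList ps 0).drop (i + 1)).take d)[j]
        = (preList ps 0).getD (i + 1 + j) 0 := by
    intro j hj
    have hjd : j < d := hlen ▸ hj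
    rw [List.getElem_take, List.getElem_drop,
      List.getD_eq_getElem (preList ps 0) 0 (by rw [length_preList]; omega)]
  have habs : ∀ j, j < d → (preList ps 0).getD (i + 1 + j) 0
      = (preList ps 0).getD i 0 + balAt (ps.drop i) 0 (j + 1) := by
    intro j hj
    rw [getD_preList ps 0 (i + 1 + j) (by omega), getD_preList ps 0 i (by omega),
      show i + 1 + j = i + (j + 1) by omega, balAt_add ps 0 i (j + 1),
      balAt_shift (ps.drop i) (balAt ps 0 i) (j + 1)]
  constructor
  · intro hle
    rw [← Bool.not_eq_true, negScan_iff]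
    rintro ⟨t, ht, hneg⟩
    have htd : t < d := by
      simp only [List.length_take, List.length_drop] at ht
      omega
    rw [balAt_take (ps.drop i) 0 d (t + 1) (by omega)] at hneg
    have hy : (preList ps 0).getD (i + 1 + t) 0 ∈ ((preList ps 0).drop (i + 1)).take d := by
      rw [← hidx t (by rw [hlen]; omega)]
      exact List.getElem_mem _
    have hmin := PySem.List.min?_isMin hm _ hy
    simp only at hmin
    rw [habs t htd] at hmin
    omega
  · intro hns
    obtain ⟨j, hjlen, hval⟩ := List.mem_iff_getElem.mp (PySem.List.min?_mem hm)
    have hjd : j < d := hlen ▸ hjlen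
    rw [← hval, hidx j hjlen, habs j hjd]
    have : ¬ balAt (ps.drop i) 0 (j + 1) < 0 := by
      intro hneg
      rw [← Bool.not_eq_true] at hns
      refine hns (negScan_iff _ _ |>.mpr ⟨j, ?_, ?_⟩)
      · simp only [List.length_take, List.length_drop]
        omega
      · rwa [balAt_take (ps.drop i) 0 d (j + 1) (by omega)]
    omega

-- the flip generator expression over range(i+1, k-1) = A's flipping loop over u[1:-1]
theorem range'_map_flip (ps : List Char) : ∀ (m s : Nat), s + m ≤ ps.length →
    (List.range' s m).map (fun t => if ps.getD t ' ' = '(' then ')' else '(')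
      = flipA ((ps.drop s).take m) := by
  intro m
  induction m with
  | zero => intro s _; simp [flipA]
  | succ m' ih =>
      intro s hs
      have hset : s < ps.length := by omega
      rw [List.range'_succ, List.map_cons, List.drop_eq_getElem_cons hset,
        List.take_succ_cons]
      simp only [flipA, List.getD_eq_getElem ps ' ' hset]
      rw [ih (s + 1) (by omega)]

-- definitional unfoldings of loopB
theorem loopB_nil (ps : List Char) : loopB ps [] = [] := by rw [loopB]

theorem loopB_lit (ps : List Char) (s : List Char) (rest : List WItem) :
    loopB ps (WItem.lit s :: rest) = s ++ loopB ps rest := by rw [loopB]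

-- main invariant: a segment task emits exactly A's transformation of that suffix
theorem loopB_seg : ∀ (N : Nat) (ps : List Char) (i : Nat) (rest : List WItem),
    i ≤ ps.length → ps.length - i ≤ N →
    loopB ps (WItem.seg i :: rest) = solA (ps.drop i) ++ loopB ps rest := by
  intro N
  induction N with
  | zero =>
      intro ps i rest hle hN
      have hil : i = ps.length := by omega
      rw [loopB, if_pos hil, hil, List.drop_length]
      simp [solA]
  | succ M ih =>
      intro ps i rest hle hN
      by_cases hi : i = ps.length
      · rw [loopB, if_pos hi, hi, List.drop_length]
        simp [solA]
      · have hilt : i < ps.length := lt_of_le_of_ne hle hi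
        have hsegne : ps.drop i ≠ [] := by
          rw [ne_eq, List.drop_eq_nil_iff]
          omega
        set d := (refScan (ps.drop i) 0 false).1 with hddef
        have hd1 : 1 ≤ d := refScan_fst_pos _ _ _ hsegne
        have hdle : d ≤ ps.length - i := by
          have := refScan_fst_le (ps.drop i) 0 false
          simpa using this
        have htarget : (preList ps 0).getD i 0 = balAt ps 0 i :=
          getD_preList ps 0 i (by omega)
        have hfind : findK (preList ps 0) ps.length ((preList ps 0).getD i 0) (i + 1)
            = i + d := by
          rw [htarget]
          have := findK_ref (ps.drop i) ps i 0 0 false (by simp) (by simpa using hilt)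
            (by simp)
          simpa using this
        have hslice : PySem.List.slice (preList ps 0) (some ((i + 1 : Nat) : Int))
              (some ((i + d + 1 : Nat) : Int))
            = ((preList ps 0).drop (i + 1)).take d := by
          rw [PySem.List.slice_natCast, show i + d + 1 - (i + 1) = d by omega]
        rw [loopB, if_neg hi]
        split
        next hm =>
          rw [hfind, hslice, PySem.List.min?_eq_none_iff] at hm
          have hlen : (((preList ps 0).drop (i + 1)).take d).length = d := by
            simp [length_preList]; omega
          rw [hm] at hlen
          simp at hlen
          omega
        next m hm =>
          rw [hfind, hslice] at hm
          have hcond := mintest_iff ps i d m hilt hd1 hdle hm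
          rw [hfind]
          -- the A side, unfolded at the same split
          have huv : uvIdx (ps.drop i) 0 0 + 1 = d := by
            have := uvIdx_eq_refScan (ps.drop i) 0 0 false hsegne
            simpa using this
          rw [solA, dif_neg hsegne]
          simp only [huv, PySem.List.slice_to_natCast, PySem.List.slice_from_natCast]
          have hvdrop : (ps.drop i).drop d = ps.drop (i + d) := by
            rw [List.drop_drop, Nat.add_comm]
          have htof : tofA ((ps.drop i).take d) 0 = !negScan ((ps.drop i).take d) 0 :=
            tofA_eq_negScan _ _
          by_cases hv : negScan ((ps.drop i).take d) 0 = false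
          · rw [if_pos (hcond.mpr hv), if_pos (by rw [htof, hv]; rfl)]
            rw [PySem.List.slice_natCast, show i + d - i = d by omega,
              ih ps (i + d) rest (by omega) (by omega), hvdrop, List.append_assoc]
          · have hvt : negScan ((ps.drop i).take d) 0 = true := by
              revert hv; cases negScan ((ps.drop i).take d) 0 <;> simp
            rw [if_neg (fun hc => hv (hcond.mp hc)), if_neg (by rw [htof, hvt]; simp)]
            rw [ih ps (i + d) (WItem.lit _ :: rest) (by omega) (by omega), loopB_lit, hvdrop]
            have hflip : (List.range' (i + 1) (i + d - 1 - (i + 1))).map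
                  (fun t => if ps.getD t ' ' = '(' then ')' else '(')
                = flipA ((ps.drop (i + 1)).take (d - 2)) := by
              rw [show i + d - 1 - (i + 1) = d - 2 by omega]
              exact range'_map_flip ps (d - 2) (i + 1) (by omega)
            have hu12 : PySem.List.slice ((ps.drop i).take d) (some 1) (some (-1))
                = (ps.drop (i + 1)).take (d - 2) := by
              rw [slice_one_neg_one, List.drop_take, List.drop_drop]
              rw [List.dropLast_eq_take, List.take_take, List.length_take, List.length_drop]
              congr 1
              omega
            rw [hflip, hu12]
            simp [List.append_assoc]

-- ===== VERDICT (by name: the statement is the Claim_ definition above) =====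
theorem solution_spec : Claim_equal_solution := by
  intro p _
  unfold Spec_solution solution solution_alt
  rw [loopB_seg p.toList.length p.toList 0 [] (by omega) (by omega), loopB_nil,
    List.drop_zero, List.append_nil]
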